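-- pv_equiv track=rewrite | github.com/tenstorrent/riescue | riescue/dtest_framework/runtime/eot.py | _asm_escape_string
-- ===== SOURCE A (Python) =====
-- def _asm_escape_string(s: str) -> str:
--     """Escape a Python string for use in a GAS ``.asciz`` directive (double-quoted)."""
--     out: list[str] = []
--     for ch in s:
--         if ch == "\\":
--             out.append("\\\\")
--         elif ch == '"':
--             out.append('\\"')
--         elif ch == "\n":
--             out.append("\\n")
--         elif ch == "\t":
--             out.append("\\t")
--         elif ord(ch) < 32 or ord(ch) > 126:
--             out.append(f"\\{ord(ch):03o}")
--         else:
--             out.append(ch)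
--     return "".join(out)
-- ===== SOURCE B (Python) =====
-- _SPECIALS = {"\\": "\\\\", '"': '\\"', "\n": "\\n", "\t": "\\t"}
--
--
-- def _asm_escape_string(s: str) -> str:
--     """Escape a Python string for use in a GAS ``.asciz`` directive (double-quoted)."""
--     # Two-pointer run scanner: copy maximal runs of safe characters wholesale
--     # as slices, and emit an escape only at the run boundaries.
--     out: list[str] = []
--     i = 0
--     n = len(s)
--     while i < n:
--         j = i
--         while j < n and s[j] not in _SPECIALS and 32 <= ord(s[j]) <= 126:
--             j += 1
--         out.append(s[i:j])  # whole safe run, copied verbatim in one slice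
--         if j < n:
--             ch = s[j]
--             out.append(_SPECIALS.get(ch) or "\\%03o" % ord(ch))
--             j += 1
--         i = j
--     return "".join(out)
-- ===== Notes on version B (the rewrite author's own statement) =====
-- stated objective: alternative
-- what changed: Replaces A's per-character append loop by a two-pointer run scanner that copies maximal runs of safe characters wholesale as slices and emits escapes only at run boundaries.
import Mathlib
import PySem

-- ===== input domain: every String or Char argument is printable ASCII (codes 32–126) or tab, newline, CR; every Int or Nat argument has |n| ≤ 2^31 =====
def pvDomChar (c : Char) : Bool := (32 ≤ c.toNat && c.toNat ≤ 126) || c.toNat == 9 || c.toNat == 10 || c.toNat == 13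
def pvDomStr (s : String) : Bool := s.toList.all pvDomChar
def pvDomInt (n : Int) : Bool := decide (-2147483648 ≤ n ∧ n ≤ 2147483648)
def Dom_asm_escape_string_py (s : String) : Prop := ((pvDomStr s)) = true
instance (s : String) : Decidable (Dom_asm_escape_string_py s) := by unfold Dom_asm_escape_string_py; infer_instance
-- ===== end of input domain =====

-- B replaces A's per-character append loop by a two-pointer run scanner that copies maximal
-- safe runs wholesale as slices and escapes only at run boundaries (alternative decomposition).

-- shared helper: Python's zero-padded 3-wide octal formatting ("{:03o}" / "%03o")
def pvOctRec (n : Nat) : List Char :=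
  if h : n = 0 then [] else pvOctRec (n / 8) ++ [Char.ofNat (48 + n % 8)]
decreasing_by exact Nat.div_lt_self (Nat.pos_of_ne_zero h) (by omega)

def pvOct3 (n : Nat) : List Char :=
  let ds := if n = 0 then ['0'] else pvOctRec n
  List.replicate (3 - ds.length) '0' ++ ds

-- ===== PORT A =====
-- the body of A's for-loop: the if/elif ladder producing the chunk appended to `out`
def pvEscA (c : Char) : List Char :=
  if c = '\\' then ['\\', '\\']
  else if c = '"' then ['\\', '"']
  else if c = '\n' then ['\\', 'n']
  else if c = '\t' then ['\\', 't']
  else if c.toNat < 32 || c.toNat > 126 then '\\' :: pvOct3 c.toNat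
  else [c]

def asm_escape_string_py (s : String) : String :=
  -- out = []; for ch in s: out.append(<ladder>); return "".join(out)
  let out := s.toList.foldl (fun out ch => out ++ [pvEscA ch]) []
  String.mk out.flatten

-- ===== PORT B =====
-- the _SPECIALS dict
def pvSpecialsB : PySem.Dict Char (List Char) :=
  PySem.Dict.mk [('\\', ['\\', '\\']), ('"', ['\\', '"']), ('\n', ['\\', 'n']), ('\t', ['\\', 't'])]

-- B's inner-while condition: s[j] not in _SPECIALS and 32 <= ord(s[j]) <= 126
def pvSafeB (c : Char) : Bool :=
  (pvSpecialsB.get? c).isNone && (32 ≤ c.toNat && c.toNat ≤ 126)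

-- _SPECIALS.get(ch) or "\\%03o" % ord(ch)  (all dict values are truthy)
def pvEscB (c : Char) : List Char :=
  match pvSpecialsB.get? c with
  | some r => r
  | none => '\\' :: pvOct3 c.toNat

-- B's outer while over pointer i, expressed over the remaining suffix: the inner
-- while advancing j computes the longest safe prefix (takeWhile), s[i:j] is that
-- run copied verbatim, and one escaped character is emitted at the boundary.
def pvRunLoopB (cs : List Char) : List Char :=
  let run := cs.takeWhile pvSafeB
  match h : cs.dropWhile pvSafeB with
  | [] => run
  | c :: rest => run ++ pvEscB c ++ pvRunLoopB rest
termination_by cs.length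
decreasing_by
  have h1 : (cs.dropWhile pvSafeB).length ≤ cs.length := cs.length_dropWhile_le pvSafeB
  rw [h] at h1; simp at h1; omega

def asm_escape_string_py_alt (s : String) : String :=
  String.mk (pvRunLoopB s.toList)

-- ===== PRECONDITION & SPEC =====
def Spec_asm_escape_string_py (s : String) (out : String) : Prop := out = asm_escape_string_py_alt s
instance (s : String) (out : String) : Decidable (Spec_asm_escape_string_py s out) := by unfold Spec_asm_escape_string_py; infer_instance

-- ===== CLAIM =====
def Claim_equal_asm_escape_string_py : Prop := ∀ (s : String), Dom_asm_escape_string_py s → Spec_asm_escape_string_py s (asm_escape_string_py s)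

-- ===== LEMMAS AND PROOFS =====
-- the four special keys, as Bool facts about ==, for a non-special character
theorem pvGetNone (c : Char) (h92 : ¬ c = '\\') (h34 : ¬ c = '"') (h10 : ¬ c = '\n')
    (h9 : ¬ c = '\t') : pvSpecialsB.get? c = none := by
  have b92 : ('\\' == c) = false := by simp; exact fun h => h92 h.symm
  have b34 : ('"' == c) = false := by simp; exact fun h => h34 h.symm
  have b10 : ('\n' == c) = false := by simp; exact fun h => h10 h.symm
  have b9 : ('\t' == c) = false := by simp; exact fun h => h9 h.symm
  simp [pvSpecialsB, PySem.Dict.get?, List.find?, b92, b34, b10, b9]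

-- a safe character passes through A's ladder unchanged
theorem pvEscA_safe (c : Char) (h : pvSafeB c = true) : pvEscA c = [c] := by
  simp only [pvSafeB, Bool.and_eq_true, decide_eq_true_eq, Option.isNone_iff_eq_none] at h
  obtain ⟨hn, h32, h126⟩ := h
  have h92 : ¬ c = '\\' := by rintro rfl; revert hn; decide
  have h34 : ¬ c = '"' := by rintro rfl; revert hn; decide
  have h10 : ¬ c = '\n' := by rintro rfl; revert hn; decide
  have h9 : ¬ c = '\t' := by rintro rfl; revert hn; decide
  simp [pvEscA, h92, h34, h10, h9, Nat.not_lt.mpr h32, Nat.not_lt.mpr h126]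

-- at a run boundary (an unsafe character) B's escape equals A's ladder chunk
theorem pvEscB_eq (c : Char) (h : pvSafeB c = false) : pvEscB c = pvEscA c := by
  by_cases h92 : c = '\\'; · subst h92; decide
  by_cases h34 : c = '"'; · subst h34; decide
  by_cases h10 : c = '\n'; · subst h10; decide
  by_cases h9 : c = '\t'; · subst h9; decide
  have hget : pvSpecialsB.get? c = none := pvGetNone c h92 h34 h10 h9
  simp only [pvSafeB, hget, Option.isNone_none, Bool.true_and, Bool.and_eq_false_iff,
    decide_eq_false_iff_not, Nat.not_le] at h
  simp only [pvEscB, hget, pvEscA, if_neg h92, if_neg h34, if_neg h10, if_neg h9]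
  have hlt : (c.toNat < 32 || c.toNat > 126) = true := by
    rcases h with h | h <;> simp [h]
  rw [if_pos hlt]

theorem pvFlattenSingleton (l : List Char) : (l.map (fun a => [a])).flatten = l := by
  induction l with
  | nil => rfl
  | cons a l ih => simp [ih]

theorem pvDropWhileHead {p : Char → Bool} {cs : List Char} {c : Char} {rest : List Char}
    (h : cs.dropWhile p = c :: rest) : p c = false := by
  induction cs with
  | nil => simp [List.dropWhile] at h
  | cons a l ih =>
      rw [List.dropWhile_cons] at h
      by_cases hp : p a = true
      · rw [if_pos hp] at h; exact ih h
      · rw [if_neg hp] at h; cases h; simpa using hp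

-- characterisation of B's run loop as A's per-character map
theorem pvRunLoopB_eq (cs : List Char) : pvRunLoopB cs = (cs.map pvEscA).flatten := by
  induction cs using pvRunLoopB.induct with
  | case1 cs h =>
    have hsplit : cs = cs.takeWhile pvSafeB := by
      conv_lhs => rw [← List.takeWhile_append_dropWhile (p := pvSafeB) (l := cs)]
      rw [h, List.append_nil]
    rw [pvRunLoopB, h]
    have hall : ∀ c ∈ cs.takeWhile pvSafeB, pvEscA c = [c] := fun c hc =>
      pvEscA_safe c (List.mem_takeWhile_imp hc)
    calc cs.takeWhile pvSafeB = ((cs.takeWhile pvSafeB).map pvEscA).flatten := by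
          rw [List.map_congr_left hall, pvFlattenSingleton]
      _ = (cs.map pvEscA).flatten := by rw [← hsplit]
  | case2 cs c rest hdw ih =>
    have hsplit : cs = cs.takeWhile pvSafeB ++ c :: rest := by
      conv_lhs => rw [← List.takeWhile_append_dropWhile (p := pvSafeB) (l := cs)]
      rw [hdw]
    have hc : pvSafeB c = false := pvDropWhileHead hdw
    have hall : ∀ x ∈ cs.takeWhile pvSafeB, pvEscA x = [x] := fun x hx =>
      pvEscA_safe x (List.mem_takeWhile_imp hx)
    rw [pvRunLoopB]
    split
    · next heq => rw [hdw] at heq; cases heq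
    · next c' rest' heq =>
        rw [hdw] at heq; cases heq
        rw [ih]
        conv_rhs => rw [hsplit]
        rw [List.map_append, List.flatten_append, List.map_congr_left hall,
          pvFlattenSingleton, List.map_cons, List.flatten_cons, pvEscB_eq c hc,
          List.append_assoc]

-- ===== VERDICT =====
theorem asm_escape_string_py_spec : Claim_equal_asm_escape_string_py := by
  intro s _
  unfold Spec_asm_escape_string_py asm_escape_string_py asm_escape_string_py_alt
  rw [PySem.List.foldl_append_singleton_eq_map pvEscA s.toList []]
  simp [pvRunLoopB_eq]
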